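-- pv_equiv track=rewrite | github.com/pypi-data/pypi-mirror-285 | packages/py-html-graph/py-html-graph-0.1.2.tar.gz/py-html-graph-0.1.2/py_html_graph/forwarder.py | addr_valid
-- ===== SOURCE A (Python) =====
-- def addr_valid(addr: str) -> bool:
--     addr = addr.replace(' ', '')
--     ip = addr
--     if (addr.find(':') != -1):
--         if (len(addr.split(':')) != 2):
--             return False
--         port = addr.split(':')[1]
--         try:
--             port_int = int(port)
--         except:
--             return False
--         if (str(port_int) != port):
--             return False
--         if (port_int <= 0 or port_int > 65535):
--             return False
--         ip = addr.split(':')[0]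
--     ip_parts = ip.split('.')
--     if (len(ip_parts) != 4):
--         return False
--     for part in ip_parts:
--         try:
--             part_int = int(part)
--         except:
--             return False
--         if (str(part_int) != part):
--             return False
--         if (part_int < 0 or part_int > 255):
--             return False
--     return True
-- ===== SOURCE B (Python) =====
-- def addr_valid(addr: str) -> bool:
--     s = addr.replace(' ', '')
--     dots = 0        # completed octets separated so far
--     in_port = False
--     val = 0         # value of the number currently being scanned
--     ndig = 0        # digits scanned in the current number
--     lead0 = False   # current number started with '0'
--     for ch in s:
--         if '0' <= ch <= '9':
--             if ndig == 0:
--                 lead0 = ch == '0'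
--                 val = ord(ch) - 48
--                 ndig = 1
--             elif lead0:
--                 return False
--             else:
--                 val = val * 10 + (ord(ch) - 48)
--                 ndig += 1
--                 if val > (65535 if in_port else 255):
--                     return False
--         elif ch == '.':
--             if in_port or ndig == 0 or dots == 3:
--                 return False
--             dots += 1
--             val = 0
--             ndig = 0
--         elif ch == ':':
--             if in_port or dots != 3 or ndig == 0:
--                 return False
--             in_port = True
--             val = 0
--             ndig = 0
--         else:
--             return False
--     if ndig == 0:
--         return False
--     if in_port:
--         return val >= 1
--     return dots == 3
-- ===== Notes on version B (the rewrite author's own statement) =====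
-- stated objective: alternative
-- what changed: Replaces A's staged passes (three colon-splits, a dot-split, and per-part try/except int() with a string round-trip check) by a single left-to-right character state machine tracking octet count, current value, digit count and a leading-zero flag, never building substrings.
import Mathlib
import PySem

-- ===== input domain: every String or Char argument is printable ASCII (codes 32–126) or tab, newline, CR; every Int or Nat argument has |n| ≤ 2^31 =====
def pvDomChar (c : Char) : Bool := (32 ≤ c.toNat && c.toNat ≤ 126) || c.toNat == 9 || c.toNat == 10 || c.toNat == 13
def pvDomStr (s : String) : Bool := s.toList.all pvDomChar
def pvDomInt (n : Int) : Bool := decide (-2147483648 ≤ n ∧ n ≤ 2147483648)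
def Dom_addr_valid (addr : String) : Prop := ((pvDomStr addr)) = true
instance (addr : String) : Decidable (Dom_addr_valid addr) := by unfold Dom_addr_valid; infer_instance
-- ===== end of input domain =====

-- B replaces A's staged splitting passes with int() round-trips by a single left-to-right
-- character state machine (objective: alternative; same O(n) cost).

-- ===== PORT A =====
-- helper: the body of A's for-loop over ip parts (early returns become a Bool per part)
def addr_valid_partOk (part : String) : Bool :=
  match PySem.Int.ofStr? part with          -- int(part); except -> return False
  | none => false
  | some part_int =>
    if PySem.Int.toStr part_int != part then false
    else if part_int < 0 || 255 < part_int then false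
    else true

-- helper: A's trailing ip code (split on '.', length check, the for-loop)
def addr_valid_loop : List String → Bool
  | [] => true
  | p :: rest => if !addr_valid_partOk p then false else addr_valid_loop rest

def addr_valid_ipOk (ip : String) : Bool :=
  let ip_parts := (PySem.Str.split? ip ".").getD []   -- sep "." is nonempty, split? is always `some`
  if ip_parts.length != 4 then false
  else addr_valid_loop ip_parts

-- helper: the three early-return checks on the port string
def addr_valid_portOk (port : String) : Bool :=
  match PySem.Int.ofStr? port with          -- int(port); except -> return False
  | none => false
  | some port_int =>
    if PySem.Int.toStr port_int != port then false
    else if port_int ≤ 0 || 65535 < port_int then false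
    else true

def addr_valid (addr : String) : Bool :=
  let addr := PySem.Str.replace addr " " ""
  if PySem.Str.find addr ":" != -1 then
    if ((PySem.Str.split? addr ":").getD []).length != 2 then false
    else if !addr_valid_portOk ((PySem.List.pyGet? ((PySem.Str.split? addr ":").getD []) 1).getD "") then false
    else addr_valid_ipOk ((PySem.List.pyGet? ((PySem.Str.split? addr ":").getD []) 0).getD "")
  else addr_valid_ipOk addr

-- ===== PORT B =====
-- B's for-loop over the characters, with its five state variables; early `return False`
-- becomes the result false, the end-of-loop code is the [] case.
def addr_valid_alt_go : List Char → Nat → Nat → Nat → Bool → Bool → Bool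
  | [], _dots, val, ndig, _lead0, inPort =>
      if ndig == 0 then false
      else if inPort then decide (1 ≤ val)
      else decide (_dots = 3)
  | ch :: rest, dots, val, ndig, lead0, inPort =>
      if '0' ≤ ch ∧ ch ≤ '9' then
        if ndig == 0 then
          addr_valid_alt_go rest dots (ch.toNat - 48) 1 (ch == '0') inPort
        else if lead0 then false
        else
          let v := val * 10 + (ch.toNat - 48)
          if (if inPort then 65535 else 255) < v then false
          else addr_valid_alt_go rest dots v (ndig + 1) lead0 inPort
      else if ch == '.' then
        if inPort || ndig == 0 || decide (dots = 3) then false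
        else addr_valid_alt_go rest (dots + 1) 0 0 lead0 inPort
      else if ch == ':' then
        if inPort || !decide (dots = 3) || ndig == 0 then false
        else addr_valid_alt_go rest dots 0 0 lead0 true
      else false

def addr_valid_alt (addr : String) : Bool :=
  let s := PySem.Str.replace addr " " ""
  addr_valid_alt_go s.toList 0 0 0 false false

-- ===== PRECONDITION & SPEC =====
def Spec_addr_valid (addr : String) (out : Bool) : Prop := out = addr_valid_alt addr
instance (addr : String) (out : Bool) : Decidable (Spec_addr_valid addr out) := by unfold Spec_addr_valid; infer_instance

-- ===== CLAIM (what is proved, stated in full; the proofs are below) =====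
def Claim_equal_addr_valid : Prop := ∀ (addr : String), Dom_addr_valid addr → Spec_addr_valid addr (addr_valid addr)

-- ===== LEMMAS AND PROOFS =====

-- Char arithmetic bridges
theorem pvCharEqIff (x y : Char) : x = y ↔ x.toNat = y.toNat := by
  constructor
  · rintro rfl; rfl
  · intro h; exact Char.ext (UInt32.toNat_inj.mp h)

theorem pvCharLe (x y : Char) : (x ≤ y) ↔ x.toNat ≤ y.toNat := by
  rw [Char.le_def]; exact UInt32.le_iff_toNat_le

theorem pvIsdigit (c : Char) : PySem.Chars.isdigit c = true ↔ 48 ≤ c.toNat ∧ c.toNat ≤ 57 := by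
  simp [PySem.Chars.isdigit, Char.le_def, UInt32.le_iff_toNat_le]

theorem pvIsdigit_eq (c : Char) : PySem.Chars.isdigit c = Char.isDigit c := by
  simp only [PySem.Chars.isdigit, Char.isDigit, Char.le_def, ge_iff_le]

theorem pvIsDigitTrue (c : Char) (h1 : 48 ≤ c.toNat) (h2 : c.toNat ≤ 57) : c.isDigit = true := by
  rw [← pvIsdigit_eq]; exact (pvIsdigit c).mpr ⟨h1, h2⟩

theorem pvIsIntSpace_digit (c : Char) (h1 : 48 ≤ c.toNat) (h2 : c.toNat ≤ 57) :
    PySem.Int.isIntSpace c = false := by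
  simp only [PySem.Int.isIntSpace, Bool.or_eq_false_iff, decide_eq_false_iff_not]
  and_intros <;> (rintro rfl; simp [Char.toNat] at h1 h2)

theorem pvDigitChar (c : Char) (h1 : 48 ≤ c.toNat) (h2 : c.toNat ≤ 57) :
    Nat.digitChar (c.toNat - 48) = c := by
  interval_cases h : c.toNat <;> exact ((pvCharEqIff _ c).mpr (by rw [h]; rfl))

-- the digit test of B, and the numeric reference machinery
def pvDigit (c : Char) : Bool := decide ('0' ≤ c) && decide (c ≤ '9')

theorem pvDigitIff (c : Char) : pvDigit c = true ↔ 48 ≤ c.toNat ∧ c.toNat ≤ 57 := by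
  simp [pvDigit, pvCharLe, show '0'.toNat = 48 from rfl, show '9'.toNat = 57 from rfl]

theorem pvDigit_eq_isdigit (c : Char) : pvDigit c = PySem.Chars.isdigit c := by
  rw [Bool.eq_iff_iff, pvDigitIff, pvIsdigit]

def pvStep (a : Nat) (c : Char) : Nat := a * 10 + (c.toNat - 48)
def pvValF (v : Nat) (l : List Char) : Nat := l.foldl pvStep v
def pvVal (l : List Char) : Nat := pvValF 0 l

theorem pvValF_nil (v : Nat) : pvValF v [] = v := rfl
theorem pvValF_cons (v : Nat) (c : Char) (t : List Char) :
    pvValF v (c :: t) = pvValF (pvStep v c) t := by simp [pvValF]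

theorem pvValF_le (l : List Char) : ∀ v : Nat, v ≤ pvValF v l := by
  induction l with
  | nil => intro v; exact le_refl v
  | cons c t ih =>
    intro v
    calc v ≤ pvStep v c := by unfold pvStep; omega
    _ ≤ pvValF (pvStep v c) t := ih _
    _ = pvValF v (c :: t) := (pvValF_cons v c t).symm

theorem pvValF_pow_le (l : List Char) : ∀ v : Nat, 10 ^ l.length * v ≤ pvValF v l := by
  induction l with
  | nil => intro v; simp [pvValF_nil]
  | cons c t ih =>
    intro v
    rw [pvValF_cons]
    calc 10 ^ (c :: t).length * v = 10 ^ t.length * (v * 10) := by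
          simp [List.length_cons, pow_succ]; ring
    _ ≤ 10 ^ t.length * pvStep v c := by
          apply Nat.mul_le_mul_left; unfold pvStep; omega
    _ ≤ pvValF (pvStep v c) t := ih _

theorem pvVal_cons (c : Char) (t : List Char) : pvVal (c :: t) = pvValF (c.toNat - 48) t := by
  unfold pvVal
  rw [pvValF_cons]
  unfold pvStep
  norm_num

-- the common numeric predicate: nonempty, digits only, no leading zero, value in [lo, hi]
def pvNumOk (lo hi : Nat) (l : List Char) : Bool :=
  match l with
  | [] => false
  | c :: t =>
    pvDigit c && t.all pvDigit && (!(c == '0') || t.isEmpty)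
      && decide (lo ≤ pvVal (c :: t)) && decide (pvVal (c :: t) ≤ hi)

theorem pvNumOk_nondigit (lo hi : Nat) (l : List Char) (c : Char) (hc : c ∈ l)
    (hd : pvDigit c = false) : pvNumOk lo hi l = false := by
  match l with
  | [] => rfl
  | a :: t =>
    rw [Bool.eq_false_iff]
    intro h
    simp only [pvNumOk, Bool.and_eq_true, List.all_eq_true] at h
    rcases List.mem_cons.mp hc with rfl | hmem
    · rw [h.1.1.1.1] at hd; exact absurd hd (by simp)
    · rw [h.1.1.1.2 c hmem] at hd; exact absurd hd (by simp)

theorem pvNumOk_long (lo hi : Nat) (k : Nat) (hk : 0 < k) (hhi : hi < 10 ^ k)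
    (l : List Char) (h : k < l.length) : pvNumOk lo hi l = false := by
  match l with
  | [] => rfl
  | a :: t =>
    rw [Bool.eq_false_iff]
    intro hok
    simp only [pvNumOk, Bool.and_eq_true, Bool.or_eq_true, Bool.not_eq_true',
      decide_eq_true_eq, List.isEmpty_iff, beq_eq_false_iff_ne, ne_eq] at hok
    obtain ⟨⟨⟨⟨hda, _⟩, hz⟩, _⟩, hle⟩ := hok
    rcases hz with hz | rfl
    · -- a ≠ '0', so value ≥ 10 ^ t.length ≥ 10 ^ k > hi
      have ha : 48 ≤ a.toNat ∧ a.toNat ≤ 57 := (pvDigitIff a).mp hda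
      have ha0 : a.toNat ≠ 48 := fun hh => hz ((pvCharEqIff a '0').mpr (by rw [hh]; rfl))
      have h1 : 10 ^ t.length * (a.toNat - 48) ≤ pvVal (a :: t) := by
        rw [pvVal_cons]; exact pvValF_pow_le t _
      have h2 : 10 ^ k ≤ 10 ^ t.length :=
        Nat.pow_le_pow_right (by norm_num) (by simp at h; omega)
      have h3 : 1 ≤ a.toNat - 48 := by omega
      nlinarith [hle]
    · simp at h; omega

theorem pvToCharsNonneg (n : Int) (h : 0 ≤ n) :
    PySem.Int.toChars n = Nat.toDigits 10 n.toNat := by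
  rw [PySem.Int.toChars, if_neg (not_lt.mpr h)]

theorem pvDigitsOfToChars (n : Int) (h : 0 ≤ n) (c : Char) (hc : c ∈ PySem.Int.toChars n) :
    PySem.Chars.isdigit c = true := by
  rw [pvToCharsNonneg n h] at hc
  rw [pvIsdigit_eq]
  exact Nat.isDigit_of_mem_toDigits (by norm_num) (by norm_num) hc

theorem pvToStrIff (n : Int) (p : String) :
    PySem.Int.toStr n = p ↔ PySem.Int.toChars n = p.toList := by
  constructor
  · rintro rfl; rw [PySem.Int.toStr]; exact (String.toList_ofList).symm
  · intro h; rw [PySem.Int.toStr, h, String.ofList_toList]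

-- both numeric checks of A, in one normal form
def pvCheckA (lo hi : Int) (p : String) : Bool :=
  match PySem.Int.ofStr? p with
  | none => false
  | some n => decide (PySem.Int.toChars n = p.toList) && decide (lo ≤ n ∧ n ≤ hi)

theorem pvPartOkA_eq (p : String) : addr_valid_partOk p = pvCheckA 0 255 p := by
  unfold addr_valid_partOk pvCheckA
  cases h : PySem.Int.ofStr? p with
  | none => rfl
  | some n =>
    by_cases he : PySem.Int.toStr n = p
    · have := (pvToStrIff n p).mp he
      simp only [he, this, decide_true, Bool.true_and, bne_self_eq_false,
        Bool.false_eq_true, if_false]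
      split_ifs with hcond <;>
        simp only [Bool.or_eq_true, decide_eq_true_eq] at hcond <;>
        symm
      · rw [decide_eq_false_iff_not]; omega
      · rw [decide_eq_true_eq]; omega
    · have : ¬ PySem.Int.toChars n = p.toList := fun hh => he ((pvToStrIff n p).mpr hh)
      simp [he, this]

theorem pvPortOkA_eq (p : String) : addr_valid_portOk p = pvCheckA 1 65535 p := by
  unfold addr_valid_portOk pvCheckA
  cases h : PySem.Int.ofStr? p with
  | none => rfl
  | some n =>
    by_cases he : PySem.Int.toStr n = p
    · have := (pvToStrIff n p).mp he
      simp only [he, this, decide_true, Bool.true_and, bne_self_eq_false,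
        Bool.false_eq_true, if_false]
      split_ifs with hcond <;>
        simp only [Bool.or_eq_true, decide_eq_true_eq] at hcond <;>
        symm
      · rw [decide_eq_false_iff_not]; omega
      · rw [decide_eq_true_eq]; omega
    · have : ¬ PySem.Int.toChars n = p.toList := fun hh => he ((pvToStrIff n p).mpr hh)
      simp [he, this]

theorem pvCheckA_nondigit (lo hi : Int) (hlo : 0 ≤ lo) (p : String) (c : Char)
    (hc : c ∈ p.toList) (hd : PySem.Chars.isdigit c = false) : pvCheckA lo hi p = false := by
  unfold pvCheckA
  cases h : PySem.Int.ofStr? p with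
  | none => rfl
  | some n =>
    by_cases he : PySem.Int.toChars n = p.toList
    · rcases lt_or_ge n 0 with hn | hn
      · have : ¬ (lo ≤ n ∧ n ≤ hi) := fun hr => absurd (le_trans hlo hr.1) (not_le.mpr hn)
        simp [this]
      · rw [← he] at hc
        rw [pvDigitsOfToChars n hn c hc] at hd
        exact absurd hd (by simp)
    · simp [he]

theorem pvCheckA_long (lo hi : Int) (hlo : 0 ≤ lo) (k : Nat) (hk : 0 < k)
    (hhi : hi < (10:Int)^k) (p : String) (h : k < p.toList.length) :
    pvCheckA lo hi p = false := by
  unfold pvCheckA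
  cases hf : PySem.Int.ofStr? p with
  | none => rfl
  | some n =>
    by_cases he : PySem.Int.toChars n = p.toList
    · rcases lt_or_ge n 0 with hn | hn
      · have : ¬ (lo ≤ n ∧ n ≤ hi) := fun hr => absurd (le_trans hlo hr.1) (not_le.mpr hn)
        simp [this]
      · have hlen : (Nat.toDigits 10 n.toNat).length = p.toList.length := by
          rw [← pvToCharsNonneg n hn, he]
        have hbig : ¬ n.toNat < 10 ^ k := by
          intro hsm
          have := (Nat.length_toDigits_le_iff (by norm_num) hk).mpr hsm
          omega
        have : ¬ (lo ≤ n ∧ n ≤ hi) := by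
          intro hr
          apply hbig
          have h1 : (n.toNat : Int) = n := Int.toNat_of_nonneg hn
          have h2 : ((10:Int))^k = ((10^k : Nat) : Int) := by push_cast; ring
          omega
        simp [this]
    · simp [he]

-- decimal digit lists of small numbers
theorem pvToDigits2 (x y : Nat) (hx1 : 1 ≤ x) (hx : x ≤ 9) (hy : y ≤ 9) :
    Nat.toDigits 10 (10*x + y) = [x.digitChar, y.digitChar] := by
  rw [Nat.toDigits_of_base_le (by norm_num) (by omega)]
  have h1 : (10*x+y)/10 = x := by omega
  have h2 : (10*x+y)%10 = y := by omega
  rw [h1, h2, Nat.toDigits_of_lt_base (by omega)]; rfl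

theorem pvToDigits3 (x y z : Nat) (hx1 : 1 ≤ x) (hx : x ≤ 9) (hy : y ≤ 9) (hz : z ≤ 9) :
    Nat.toDigits 10 (100*x + 10*y + z) = [x.digitChar, y.digitChar, z.digitChar] := by
  rw [Nat.toDigits_of_base_le (by norm_num) (by omega)]
  have h1 : (100*x+10*y+z)/10 = 10*x + y := by omega
  have h2 : (100*x+10*y+z)%10 = z := by omega
  rw [h1, h2, pvToDigits2 x y hx1 hx hy]; rfl

theorem pvToDigits4 (x y z w : Nat) (hx1 : 1 ≤ x) (hx : x ≤ 9) (hy : y ≤ 9) (hz : z ≤ 9) (hw : w ≤ 9) :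
    Nat.toDigits 10 (1000*x + 100*y + 10*z + w) = [x.digitChar, y.digitChar, z.digitChar, w.digitChar] := by
  rw [Nat.toDigits_of_base_le (by norm_num) (by omega)]
  have h1 : (1000*x+100*y+10*z+w)/10 = 100*x + 10*y + z := by omega
  have h2 : (1000*x+100*y+10*z+w)%10 = w := by omega
  rw [h1, h2, pvToDigits3 x y z hx1 hx hy hz]; rfl

theorem pvToDigits5 (x y z w v : Nat) (hx1 : 1 ≤ x) (hx : x ≤ 9) (hy : y ≤ 9) (hz : z ≤ 9) (hw : w ≤ 9) (hv : v ≤ 9) :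
    Nat.toDigits 10 (10000*x + 1000*y + 100*z + 10*w + v) = [x.digitChar, y.digitChar, z.digitChar, w.digitChar, v.digitChar] := by
  rw [Nat.toDigits_of_base_le (by norm_num) (by omega)]
  have h1 : (10000*x+1000*y+100*z+10*w+v)/10 = 1000*x + 100*y + 10*z + w := by omega
  have h2 : (10000*x+1000*y+100*z+10*w+v)%10 = v := by omega
  rw [h1, h2, pvToDigits4 x y z w hx1 hx hy hz hw]; rfl

theorem pvOfChars1 (a : Char) (ha1 : 48 ≤ a.toNat) (ha2 : a.toNat ≤ 57) :
    PySem.Int.ofChars? [a] = some ((a.toNat - 48 : Nat) : Int) := by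
  simp only [PySem.Int.ofChars?, List.dropWhile_cons, pvIsIntSpace_digit a ha1 ha2,
    List.reverse_cons, List.reverse_nil, List.nil_append,
    Bool.false_eq_true, if_false, List.dropWhile_nil]
  split
  next h => exact absurd h (by rintro ⟨rfl⟩; simp [Char.toNat] at ha1 ha2)
  next h => exact absurd h (by rintro ⟨rfl⟩; simp [Char.toNat] at ha1 ha2)
  next =>
    show (Option.map (fun n => (n : Int))
      (Option.bind (if a.isDigit = true then _ else (_ : Option Nat)) _) : Option Int) = _
    rw [if_pos (pvIsDigitTrue a ha1 ha2)]
    show (Option.map (fun n => (n : Int)) (Option.bind (some (_ : Nat)) _) : Option Int) = _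
    simp only [Option.bind_some, show '0'.toNat = 48 from rfl]
    simp

theorem pvOfChars2 (a b : Char) (ha1 : 48 ≤ a.toNat) (ha2 : a.toNat ≤ 57) (hb1 : 48 ≤ b.toNat) (hb2 : b.toNat ≤ 57) :
    PySem.Int.ofChars? [a, b] = some ((10*(a.toNat - 48) + (b.toNat - 48) : Nat) : Int) := by
  simp only [PySem.Int.ofChars?, List.dropWhile_cons, pvIsIntSpace_digit a ha1 ha2, pvIsIntSpace_digit b hb1 hb2,
    List.reverse_cons, List.reverse_nil, List.nil_append, List.cons_append,
    Bool.false_eq_true, if_false, List.dropWhile_nil]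
  split
  next h => exact absurd h (by rintro ⟨rfl⟩; simp [Char.toNat] at ha1 ha2)
  next h => exact absurd h (by rintro ⟨rfl⟩; simp [Char.toNat] at ha1 ha2)
  next =>
    show (Option.map (fun n => (n : Int))
      (Option.bind (if a.isDigit = true then _ else (_ : Option Nat)) _) : Option Int) = _
    rw [if_pos (pvIsDigitTrue a ha1 ha2)]
    show (Option.map (fun n => (n : Int))
      (Option.bind (if b.isDigit = true then _ else (_ : Option Nat)) _) : Option Int) = _
    rw [if_pos (pvIsDigitTrue b hb1 hb2)]
    show (Option.map (fun n => (n : Int)) (Option.bind (some (_ : Nat)) _) : Option Int) = _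
    simp only [Option.bind_some, show '0'.toNat = 48 from rfl]
    simp
    omega

theorem pvOfChars3 (a b c : Char) (ha1 : 48 ≤ a.toNat) (ha2 : a.toNat ≤ 57) (hb1 : 48 ≤ b.toNat) (hb2 : b.toNat ≤ 57) (hc1 : 48 ≤ c.toNat) (hc2 : c.toNat ≤ 57) :
    PySem.Int.ofChars? [a, b, c] = some ((100*(a.toNat - 48) + 10*(b.toNat - 48) + (c.toNat - 48) : Nat) : Int) := by
  simp only [PySem.Int.ofChars?, List.dropWhile_cons, pvIsIntSpace_digit a ha1 ha2, pvIsIntSpace_digit b hb1 hb2, pvIsIntSpace_digit c hc1 hc2,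
    List.reverse_cons, List.reverse_nil, List.nil_append, List.cons_append,
    Bool.false_eq_true, if_false, List.dropWhile_nil]
  split
  next h => exact absurd h (by rintro ⟨rfl⟩; simp [Char.toNat] at ha1 ha2)
  next h => exact absurd h (by rintro ⟨rfl⟩; simp [Char.toNat] at ha1 ha2)
  next =>
    show (Option.map (fun n => (n : Int))
      (Option.bind (if a.isDigit = true then _ else (_ : Option Nat)) _) : Option Int) = _
    rw [if_pos (pvIsDigitTrue a ha1 ha2)]
    show (Option.map (fun n => (n : Int))
      (Option.bind (if b.isDigit = true then _ else (_ : Option Nat)) _) : Option Int) = _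
    rw [if_pos (pvIsDigitTrue b hb1 hb2)]
    show (Option.map (fun n => (n : Int))
      (Option.bind (if c.isDigit = true then _ else (_ : Option Nat)) _) : Option Int) = _
    rw [if_pos (pvIsDigitTrue c hc1 hc2)]
    show (Option.map (fun n => (n : Int)) (Option.bind (some (_ : Nat)) _) : Option Int) = _
    simp only [Option.bind_some, show '0'.toNat = 48 from rfl]
    simp
    omega

theorem pvOfChars4 (a b c d : Char) (ha1 : 48 ≤ a.toNat) (ha2 : a.toNat ≤ 57) (hb1 : 48 ≤ b.toNat) (hb2 : b.toNat ≤ 57) (hc1 : 48 ≤ c.toNat) (hc2 : c.toNat ≤ 57) (hd1 : 48 ≤ d.toNat) (hd2 : d.toNat ≤ 57) :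
    PySem.Int.ofChars? [a, b, c, d] = some ((1000*(a.toNat - 48) + 100*(b.toNat - 48) + 10*(c.toNat - 48) + (d.toNat - 48) : Nat) : Int) := by
  simp only [PySem.Int.ofChars?, List.dropWhile_cons, pvIsIntSpace_digit a ha1 ha2, pvIsIntSpace_digit b hb1 hb2, pvIsIntSpace_digit c hc1 hc2, pvIsIntSpace_digit d hd1 hd2,
    List.reverse_cons, List.reverse_nil, List.nil_append, List.cons_append,
    Bool.false_eq_true, if_false, List.dropWhile_nil]
  split
  next h => exact absurd h (by rintro ⟨rfl⟩; simp [Char.toNat] at ha1 ha2)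
  next h => exact absurd h (by rintro ⟨rfl⟩; simp [Char.toNat] at ha1 ha2)
  next =>
    show (Option.map (fun n => (n : Int))
      (Option.bind (if a.isDigit = true then _ else (_ : Option Nat)) _) : Option Int) = _
    rw [if_pos (pvIsDigitTrue a ha1 ha2)]
    show (Option.map (fun n => (n : Int))
      (Option.bind (if b.isDigit = true then _ else (_ : Option Nat)) _) : Option Int) = _
    rw [if_pos (pvIsDigitTrue b hb1 hb2)]
    show (Option.map (fun n => (n : Int))
      (Option.bind (if c.isDigit = true then _ else (_ : Option Nat)) _) : Option Int) = _
    rw [if_pos (pvIsDigitTrue c hc1 hc2)]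
    show (Option.map (fun n => (n : Int))
      (Option.bind (if d.isDigit = true then _ else (_ : Option Nat)) _) : Option Int) = _
    rw [if_pos (pvIsDigitTrue d hd1 hd2)]
    show (Option.map (fun n => (n : Int)) (Option.bind (some (_ : Nat)) _) : Option Int) = _
    simp only [Option.bind_some, show '0'.toNat = 48 from rfl]
    simp
    omega

theorem pvOfChars5 (a b c d e : Char) (ha1 : 48 ≤ a.toNat) (ha2 : a.toNat ≤ 57) (hb1 : 48 ≤ b.toNat) (hb2 : b.toNat ≤ 57) (hc1 : 48 ≤ c.toNat) (hc2 : c.toNat ≤ 57) (hd1 : 48 ≤ d.toNat) (hd2 : d.toNat ≤ 57) (he1 : 48 ≤ e.toNat) (he2 : e.toNat ≤ 57) :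
    PySem.Int.ofChars? [a, b, c, d, e] = some ((10000*(a.toNat - 48) + 1000*(b.toNat - 48) + 100*(c.toNat - 48) + 10*(d.toNat - 48) + (e.toNat - 48) : Nat) : Int) := by
  simp only [PySem.Int.ofChars?, List.dropWhile_cons, pvIsIntSpace_digit a ha1 ha2, pvIsIntSpace_digit b hb1 hb2, pvIsIntSpace_digit c hc1 hc2, pvIsIntSpace_digit d hd1 hd2, pvIsIntSpace_digit e he1 he2,
    List.reverse_cons, List.reverse_nil, List.nil_append, List.cons_append,
    Bool.false_eq_true, if_false, List.dropWhile_nil]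
  split
  next h => exact absurd h (by rintro ⟨rfl⟩; simp [Char.toNat] at ha1 ha2)
  next h => exact absurd h (by rintro ⟨rfl⟩; simp [Char.toNat] at ha1 ha2)
  next =>
    show (Option.map (fun n => (n : Int))
      (Option.bind (if a.isDigit = true then _ else (_ : Option Nat)) _) : Option Int) = _
    rw [if_pos (pvIsDigitTrue a ha1 ha2)]
    show (Option.map (fun n => (n : Int))
      (Option.bind (if b.isDigit = true then _ else (_ : Option Nat)) _) : Option Int) = _
    rw [if_pos (pvIsDigitTrue b hb1 hb2)]
    show (Option.map (fun n => (n : Int))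
      (Option.bind (if c.isDigit = true then _ else (_ : Option Nat)) _) : Option Int) = _
    rw [if_pos (pvIsDigitTrue c hc1 hc2)]
    show (Option.map (fun n => (n : Int))
      (Option.bind (if d.isDigit = true then _ else (_ : Option Nat)) _) : Option Int) = _
    rw [if_pos (pvIsDigitTrue d hd1 hd2)]
    show (Option.map (fun n => (n : Int))
      (Option.bind (if e.isDigit = true then _ else (_ : Option Nat)) _) : Option Int) = _
    rw [if_pos (pvIsDigitTrue e he1 he2)]
    show (Option.map (fun n => (n : Int)) (Option.bind (some (_ : Nat)) _) : Option Int) = _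
    simp only [Option.bind_some, show '0'.toNat = 48 from rfl]
    simp
    omega

-- A's per-part checks equal the numeric predicate
theorem pvPartNum (p : String) : addr_valid_partOk p = pvNumOk 0 255 p.toList := by
  rw [pvPartOkA_eq]
  by_cases hdig : ∀ c ∈ p.toList, PySem.Chars.isdigit c = true
  case neg =>
    push_neg at hdig
    obtain ⟨c, hc, hd⟩ := hdig
    rw [pvCheckA_nondigit 0 255 (by norm_num) p c hc (by simpa using hd),
      pvNumOk_nondigit 0 255 p.toList c hc (by rw [pvDigit_eq_isdigit]; simpa using hd)]
  case pos =>
    match hl : p.toList with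
    | [] =>
      have hof : PySem.Int.ofStr? p = none := by rw [PySem.Int.ofStr?, hl]; rfl
      unfold pvCheckA
      rw [hof]
      rfl
    | a :: b :: c :: d :: t =>
      rw [pvCheckA_long 0 255 (by norm_num) 3 (by norm_num) (by norm_num) p (by rw [hl]; simp),
        pvNumOk_long 0 255 3 (by norm_num) (by norm_num) _ (by simp)]
    | [a] =>
      have ⟨ha1, ha2⟩ := (pvIsdigit a).mp (hdig a (by rw [hl]; simp))
      have hof : PySem.Int.ofStr? p = some ((a.toNat - 48 : Nat) : Int) := by
        rw [PySem.Int.ofStr?, hl]; exact pvOfChars1 a ha1 ha2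
      simp only [pvCheckA, hof]
      have htc : PySem.Int.toChars ((a.toNat - 48 : Nat) : Int) = [a] := by
        rw [pvToCharsNonneg _ (Int.natCast_nonneg _), Int.toNat_natCast,
          Nat.toDigits_of_lt_base (by omega), pvDigitChar a ha1 ha2]
      rw [hl, htc, decide_eq_true (show [a] = [a] from rfl), Bool.true_and]
      rw [Bool.eq_iff_iff]
      simp only [pvNumOk, pvVal, pvValF, pvStep, List.foldl_cons, List.foldl_nil,
        List.all_cons, List.all_nil, List.isEmpty_cons, List.isEmpty_nil,
        Bool.and_eq_true, Bool.and_true, Bool.or_true, Bool.true_or, Bool.or_eq_true,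
        Bool.not_eq_true', decide_eq_true_eq, beq_eq_false_iff_ne, ne_eq,
        pvDigitIff, pvCharEqIff, show ('0' : Char).toNat = 48 from rfl]
      omega
    | [a, b] =>
      have ⟨ha1, ha2⟩ := (pvIsdigit a).mp (hdig a (by rw [hl]; simp))
      have ⟨hb1, hb2⟩ := (pvIsdigit b).mp (hdig b (by rw [hl]; simp))
      have hof : PySem.Int.ofStr? p = some ((10*(a.toNat - 48) + (b.toNat - 48) : Nat) : Int) := by
        rw [PySem.Int.ofStr?, hl]; exact pvOfChars2 a b ha1 ha2 hb1 hb2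
      simp only [pvCheckA, hof]
      have htc : PySem.Int.toChars ((10*(a.toNat - 48) + (b.toNat - 48) : Nat) : Int)
          = Nat.toDigits 10 (10*(a.toNat - 48) + (b.toNat - 48)) := by
        rw [pvToCharsNonneg _ (Int.natCast_nonneg _), Int.toNat_natCast]
      rw [hl, htc]
      by_cases h0 : a.toNat = 48
      · have ha0 : a = '0' := (pvCharEqIff a '0').mpr (by rw [h0]; rfl)
        have hv : 10*(a.toNat - 48) + (b.toNat - 48) = b.toNat - 48 := by omega
        rw [hv, Nat.toDigits_of_lt_base (by omega)]
        rw [decide_eq_false (by simp : ¬ ([Nat.digitChar (b.toNat - 48)] = [a, b])), Bool.false_and]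
        symm
        rw [ha0]
        simp [pvNumOk]
      · have hx1 : 1 ≤ a.toNat - 48 := by omega
        rw [pvToDigits2 _ _ hx1 (by omega) (by omega),
          pvDigitChar a ha1 ha2, pvDigitChar b hb1 hb2,
          decide_eq_true (show [a, b] = [a, b] from rfl), Bool.true_and]
        rw [Bool.eq_iff_iff]
        simp only [pvNumOk, pvVal, pvValF, pvStep, List.foldl_cons, List.foldl_nil,
          List.all_cons, List.all_nil, List.isEmpty_cons, List.isEmpty_nil,
          Bool.and_eq_true, Bool.and_true, Bool.or_true, Bool.true_or, Bool.or_eq_true,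
          Bool.not_eq_true', decide_eq_true_eq, beq_eq_false_iff_ne, ne_eq,
          pvDigitIff, pvCharEqIff, show ('0' : Char).toNat = 48 from rfl]
        omega
    | [a, b, c] =>
      have ⟨ha1, ha2⟩ := (pvIsdigit a).mp (hdig a (by rw [hl]; simp))
      have ⟨hb1, hb2⟩ := (pvIsdigit b).mp (hdig b (by rw [hl]; simp))
      have ⟨hc1, hc2⟩ := (pvIsdigit c).mp (hdig c (by rw [hl]; simp))
      have hof : PySem.Int.ofStr? p
          = some ((100*(a.toNat - 48) + 10*(b.toNat - 48) + (c.toNat - 48) : Nat) : Int) := by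
        rw [PySem.Int.ofStr?, hl]; exact pvOfChars3 a b c ha1 ha2 hb1 hb2 hc1 hc2
      simp only [pvCheckA, hof]
      have htc : PySem.Int.toChars ((100*(a.toNat - 48) + 10*(b.toNat - 48) + (c.toNat - 48) : Nat) : Int)
          = Nat.toDigits 10 (100*(a.toNat - 48) + 10*(b.toNat - 48) + (c.toNat - 48)) := by
        rw [pvToCharsNonneg _ (Int.natCast_nonneg _), Int.toNat_natCast]
      rw [hl, htc]
      by_cases h0 : a.toNat = 48
      · have ha0 : a = '0' := (pvCharEqIff a '0').mpr (by rw [h0]; rfl)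
        have hlen := Nat.toDigits_length 10 (100*(a.toNat - 48) + 10*(b.toNat - 48) + (c.toNat - 48))
          2 (by norm_num) (by omega)
        rw [decide_eq_false (by intro h; rw [h] at hlen; simp at hlen), Bool.false_and]
        symm
        rw [ha0]
        simp [pvNumOk]
      · have hx1 : 1 ≤ a.toNat - 48 := by omega
        rw [pvToDigits3 _ _ _ hx1 (by omega) (by omega) (by omega),
          pvDigitChar a ha1 ha2, pvDigitChar b hb1 hb2, pvDigitChar c hc1 hc2,
          decide_eq_true (show [a, b, c] = [a, b, c] from rfl), Bool.true_and]
        rw [Bool.eq_iff_iff]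
        simp only [pvNumOk, pvVal, pvValF, pvStep, List.foldl_cons, List.foldl_nil,
          List.all_cons, List.all_nil, List.isEmpty_cons, List.isEmpty_nil,
          Bool.and_eq_true, Bool.and_true, Bool.or_true, Bool.true_or, Bool.or_eq_true,
          Bool.not_eq_true', decide_eq_true_eq, beq_eq_false_iff_ne, ne_eq,
          pvDigitIff, pvCharEqIff, show ('0' : Char).toNat = 48 from rfl]
        omega

theorem pvPortNum (p : String) : addr_valid_portOk p = pvNumOk 1 65535 p.toList := by
  rw [pvPortOkA_eq]
  by_cases hdig : ∀ c ∈ p.toList, PySem.Chars.isdigit c = true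
  case neg =>
    push_neg at hdig
    obtain ⟨c, hc, hd⟩ := hdig
    rw [pvCheckA_nondigit 1 65535 (by norm_num) p c hc (by simpa using hd),
      pvNumOk_nondigit 1 65535 p.toList c hc (by rw [pvDigit_eq_isdigit]; simpa using hd)]
  case pos =>
    match hl : p.toList with
    | [] =>
      have hof : PySem.Int.ofStr? p = none := by rw [PySem.Int.ofStr?, hl]; rfl
      unfold pvCheckA
      rw [hof]
      rfl
    | a :: b :: c :: d :: e :: f :: t =>
      rw [pvCheckA_long 1 65535 (by norm_num) 5 (by norm_num) (by norm_num) p (by rw [hl]; simp),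
        pvNumOk_long 1 65535 5 (by norm_num) (by norm_num) _ (by simp)]
    | [a] =>
      have ⟨ha1, ha2⟩ := (pvIsdigit a).mp (hdig a (by rw [hl]; simp))
      have hof : PySem.Int.ofStr? p = some ((a.toNat - 48 : Nat) : Int) := by
        rw [PySem.Int.ofStr?, hl]; exact pvOfChars1 a ha1 ha2
      simp only [pvCheckA, hof]
      have htc : PySem.Int.toChars ((a.toNat - 48 : Nat) : Int) = [a] := by
        rw [pvToCharsNonneg _ (Int.natCast_nonneg _), Int.toNat_natCast,
          Nat.toDigits_of_lt_base (by omega), pvDigitChar a ha1 ha2]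
      rw [hl, htc, decide_eq_true (show [a] = [a] from rfl), Bool.true_and]
      rw [Bool.eq_iff_iff]
      simp only [pvNumOk, pvVal, pvValF, pvStep, List.foldl_cons, List.foldl_nil,
        List.all_cons, List.all_nil, List.isEmpty_cons, List.isEmpty_nil,
        Bool.and_eq_true, Bool.and_true, Bool.or_true, Bool.true_or, Bool.or_eq_true,
        Bool.not_eq_true', decide_eq_true_eq, beq_eq_false_iff_ne, ne_eq,
        pvDigitIff, pvCharEqIff, show ('0' : Char).toNat = 48 from rfl]
      omega
    | [a, b] =>
      have ⟨ha1, ha2⟩ := (pvIsdigit a).mp (hdig a (by rw [hl]; simp))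
      have ⟨hb1, hb2⟩ := (pvIsdigit b).mp (hdig b (by rw [hl]; simp))
      have hof : PySem.Int.ofStr? p = some ((10*(a.toNat - 48) + (b.toNat - 48) : Nat) : Int) := by
        rw [PySem.Int.ofStr?, hl]; exact pvOfChars2 a b ha1 ha2 hb1 hb2
      simp only [pvCheckA, hof]
      have htc : PySem.Int.toChars ((10*(a.toNat - 48) + (b.toNat - 48) : Nat) : Int)
          = Nat.toDigits 10 (10*(a.toNat - 48) + (b.toNat - 48)) := by
        rw [pvToCharsNonneg _ (Int.natCast_nonneg _), Int.toNat_natCast]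
      rw [hl, htc]
      by_cases h0 : a.toNat = 48
      · have ha0 : a = '0' := (pvCharEqIff a '0').mpr (by rw [h0]; rfl)
        have hv : 10*(a.toNat - 48) + (b.toNat - 48) = b.toNat - 48 := by omega
        rw [hv, Nat.toDigits_of_lt_base (by omega)]
        rw [decide_eq_false (by simp : ¬ ([Nat.digitChar (b.toNat - 48)] = [a, b])), Bool.false_and]
        symm
        rw [ha0]
        simp [pvNumOk]
      · have hx1 : 1 ≤ a.toNat - 48 := by omega
        rw [pvToDigits2 _ _ hx1 (by omega) (by omega),
          pvDigitChar a ha1 ha2, pvDigitChar b hb1 hb2,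
          decide_eq_true (show [a, b] = [a, b] from rfl), Bool.true_and]
        rw [Bool.eq_iff_iff]
        simp only [pvNumOk, pvVal, pvValF, pvStep, List.foldl_cons, List.foldl_nil,
          List.all_cons, List.all_nil, List.isEmpty_cons, List.isEmpty_nil,
          Bool.and_eq_true, Bool.and_true, Bool.or_true, Bool.true_or, Bool.or_eq_true,
          Bool.not_eq_true', decide_eq_true_eq, beq_eq_false_iff_ne, ne_eq,
          pvDigitIff, pvCharEqIff, show ('0' : Char).toNat = 48 from rfl]
        omega
    | [a, b, c] =>
      have ⟨ha1, ha2⟩ := (pvIsdigit a).mp (hdig a (by rw [hl]; simp))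
      have ⟨hb1, hb2⟩ := (pvIsdigit b).mp (hdig b (by rw [hl]; simp))
      have ⟨hc1, hc2⟩ := (pvIsdigit c).mp (hdig c (by rw [hl]; simp))
      have hof : PySem.Int.ofStr? p
          = some ((100*(a.toNat - 48) + 10*(b.toNat - 48) + (c.toNat - 48) : Nat) : Int) := by
        rw [PySem.Int.ofStr?, hl]; exact pvOfChars3 a b c ha1 ha2 hb1 hb2 hc1 hc2
      simp only [pvCheckA, hof]
      have htc : PySem.Int.toChars ((100*(a.toNat - 48) + 10*(b.toNat - 48) + (c.toNat - 48) : Nat) : Int)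
          = Nat.toDigits 10 (100*(a.toNat - 48) + 10*(b.toNat - 48) + (c.toNat - 48)) := by
        rw [pvToCharsNonneg _ (Int.natCast_nonneg _), Int.toNat_natCast]
      rw [hl, htc]
      by_cases h0 : a.toNat = 48
      · have ha0 : a = '0' := (pvCharEqIff a '0').mpr (by rw [h0]; rfl)
        have hlen := Nat.toDigits_length 10 (100*(a.toNat - 48) + 10*(b.toNat - 48) + (c.toNat - 48))
          2 (by norm_num) (by omega)
        rw [decide_eq_false (by intro h; rw [h] at hlen; simp at hlen), Bool.false_and]
        symm
        rw [ha0]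
        simp [pvNumOk]
      · have hx1 : 1 ≤ a.toNat - 48 := by omega
        rw [pvToDigits3 _ _ _ hx1 (by omega) (by omega) (by omega),
          pvDigitChar a ha1 ha2, pvDigitChar b hb1 hb2, pvDigitChar c hc1 hc2,
          decide_eq_true (show [a, b, c] = [a, b, c] from rfl), Bool.true_and]
        rw [Bool.eq_iff_iff]
        simp only [pvNumOk, pvVal, pvValF, pvStep, List.foldl_cons, List.foldl_nil,
          List.all_cons, List.all_nil, List.isEmpty_cons, List.isEmpty_nil,
          Bool.and_eq_true, Bool.and_true, Bool.or_true, Bool.true_or, Bool.or_eq_true,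
          Bool.not_eq_true', decide_eq_true_eq, beq_eq_false_iff_ne, ne_eq,
          pvDigitIff, pvCharEqIff, show ('0' : Char).toNat = 48 from rfl]
        omega
    | [a, b, c, d] =>
      have ⟨ha1, ha2⟩ := (pvIsdigit a).mp (hdig a (by rw [hl]; simp))
      have ⟨hb1, hb2⟩ := (pvIsdigit b).mp (hdig b (by rw [hl]; simp))
      have ⟨hc1, hc2⟩ := (pvIsdigit c).mp (hdig c (by rw [hl]; simp))
      have ⟨hd1, hd2⟩ := (pvIsdigit d).mp (hdig d (by rw [hl]; simp))
      have hof : PySem.Int.ofStr? p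
          = some ((1000*(a.toNat - 48) + 100*(b.toNat - 48) + 10*(c.toNat - 48) + (d.toNat - 48) : Nat) : Int) := by
        rw [PySem.Int.ofStr?, hl]; exact pvOfChars4 a b c d ha1 ha2 hb1 hb2 hc1 hc2 hd1 hd2
      simp only [pvCheckA, hof]
      have htc : PySem.Int.toChars ((1000*(a.toNat - 48) + 100*(b.toNat - 48) + 10*(c.toNat - 48) + (d.toNat - 48) : Nat) : Int)
          = Nat.toDigits 10 (1000*(a.toNat - 48) + 100*(b.toNat - 48) + 10*(c.toNat - 48) + (d.toNat - 48)) := by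
        rw [pvToCharsNonneg _ (Int.natCast_nonneg _), Int.toNat_natCast]
      rw [hl, htc]
      by_cases h0 : a.toNat = 48
      · have ha0 : a = '0' := (pvCharEqIff a '0').mpr (by rw [h0]; rfl)
        have hlen := Nat.toDigits_length 10 (1000*(a.toNat - 48) + 100*(b.toNat - 48) + 10*(c.toNat - 48) + (d.toNat - 48))
          3 (by norm_num) (by omega)
        rw [decide_eq_false (by intro h; rw [h] at hlen; simp at hlen), Bool.false_and]
        symm
        rw [ha0]
        simp [pvNumOk]
      · have hx1 : 1 ≤ a.toNat - 48 := by omega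
        rw [pvToDigits4 _ _ _ _ hx1 (by omega) (by omega) (by omega) (by omega),
          pvDigitChar a ha1 ha2, pvDigitChar b hb1 hb2, pvDigitChar c hc1 hc2, pvDigitChar d hd1 hd2,
          decide_eq_true (show [a, b, c, d] = [a, b, c, d] from rfl), Bool.true_and]
        rw [Bool.eq_iff_iff]
        simp only [pvNumOk, pvVal, pvValF, pvStep, List.foldl_cons, List.foldl_nil,
          List.all_cons, List.all_nil, List.isEmpty_cons, List.isEmpty_nil,
          Bool.and_eq_true, Bool.and_true, Bool.or_true, Bool.true_or, Bool.or_eq_true,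
          Bool.not_eq_true', decide_eq_true_eq, beq_eq_false_iff_ne, ne_eq,
          pvDigitIff, pvCharEqIff, show ('0' : Char).toNat = 48 from rfl]
        omega
    | [a, b, c, d, e] =>
      have ⟨ha1, ha2⟩ := (pvIsdigit a).mp (hdig a (by rw [hl]; simp))
      have ⟨hb1, hb2⟩ := (pvIsdigit b).mp (hdig b (by rw [hl]; simp))
      have ⟨hc1, hc2⟩ := (pvIsdigit c).mp (hdig c (by rw [hl]; simp))
      have ⟨hd1, hd2⟩ := (pvIsdigit d).mp (hdig d (by rw [hl]; simp))
      have ⟨he1, he2⟩ := (pvIsdigit e).mp (hdig e (by rw [hl]; simp))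
      have hof : PySem.Int.ofStr? p
          = some ((10000*(a.toNat - 48) + 1000*(b.toNat - 48) + 100*(c.toNat - 48) + 10*(d.toNat - 48) + (e.toNat - 48) : Nat) : Int) := by
        rw [PySem.Int.ofStr?, hl]; exact pvOfChars5 a b c d e ha1 ha2 hb1 hb2 hc1 hc2 hd1 hd2 he1 he2
      simp only [pvCheckA, hof]
      have htc : PySem.Int.toChars ((10000*(a.toNat - 48) + 1000*(b.toNat - 48) + 100*(c.toNat - 48) + 10*(d.toNat - 48) + (e.toNat - 48) : Nat) : Int)
          = Nat.toDigits 10 (10000*(a.toNat - 48) + 1000*(b.toNat - 48) + 100*(c.toNat - 48) + 10*(d.toNat - 48) + (e.toNat - 48)) := by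
        rw [pvToCharsNonneg _ (Int.natCast_nonneg _), Int.toNat_natCast]
      rw [hl, htc]
      by_cases h0 : a.toNat = 48
      · have ha0 : a = '0' := (pvCharEqIff a '0').mpr (by rw [h0]; rfl)
        have hlen := Nat.toDigits_length 10 (10000*(a.toNat - 48) + 1000*(b.toNat - 48) + 100*(c.toNat - 48) + 10*(d.toNat - 48) + (e.toNat - 48))
          4 (by norm_num) (by omega)
        rw [decide_eq_false (by intro h; rw [h] at hlen; simp at hlen), Bool.false_and]
        symm
        rw [ha0]
        simp [pvNumOk]
      · have hx1 : 1 ≤ a.toNat - 48 := by omega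
        rw [pvToDigits5 _ _ _ _ _ hx1 (by omega) (by omega) (by omega) (by omega) (by omega),
          pvDigitChar a ha1 ha2, pvDigitChar b hb1 hb2, pvDigitChar c hc1 hc2, pvDigitChar d hd1 hd2, pvDigitChar e he1 he2,
          decide_eq_true (show [a, b, c, d, e] = [a, b, c, d, e] from rfl), Bool.true_and]
        rw [Bool.eq_iff_iff]
        simp only [pvNumOk, pvVal, pvValF, pvStep, List.foldl_cons, List.foldl_nil,
          List.all_cons, List.all_nil, List.isEmpty_cons, List.isEmpty_nil,
          Bool.and_eq_true, Bool.and_true, Bool.or_true, Bool.true_or, Bool.or_eq_true,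
          Bool.not_eq_true', decide_eq_true_eq, beq_eq_false_iff_ne, ne_eq,
          pvDigitIff, pvCharEqIff, show ('0' : Char).toNat = 48 from rfl]
        omega

-- ========== a clean structural model of str.split on a one-char separator ==========
def pvSplit (sep : Char) : List Char → List (List Char)
  | [] => [[]]
  | c :: t =>
    if c == sep then [] :: pvSplit sep t
    else
      match pvSplit sep t with
      | [] => [[c]]
      | h :: r => (c :: h) :: r

theorem pvSplit_ne_nil (sep : Char) (l : List Char) : pvSplit sep l ≠ [] := by
  match l with
  | [] => simp [pvSplit]
  | c :: t =>
    unfold pvSplit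
    split_ifs
    · simp
    · match h : pvSplit sep t with
      | [] => simp
      | h' :: r => simp

theorem pvGoZero (sep : Char) (l cur : List Char) (acc : List (List Char)) :
    PySem.Chars.splitOn.go [sep] 0 l cur acc = ((cur.reverse ++ l) :: acc).reverse := rfl
theorem pvGoNil (sep : Char) (fuel : Nat) (cur : List Char) (acc : List (List Char)) :
    PySem.Chars.splitOn.go [sep] (fuel+1) [] cur acc = (cur.reverse :: acc).reverse := rfl
theorem pvGoCons (sep : Char) (fuel : Nat) (c : Char) (rest cur : List Char) (acc : List (List Char)) :
    PySem.Chars.splitOn.go [sep] (fuel+1) (c::rest) cur acc =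
      if [sep].isPrefixOf (c::rest) then
        PySem.Chars.splitOn.go [sep] fuel (List.drop 1 (c::rest)) [] (cur.reverse::acc)
      else PySem.Chars.splitOn.go [sep] fuel rest (c::cur) acc := rfl

theorem pvSplitOn_go_eq (sep : Char) (fuel : Nat) : ∀ (l cur : List Char) (acc : List (List Char)),
    l.length ≤ fuel →
    PySem.Chars.splitOn.go [sep] fuel l cur acc
      = acc.reverse ++ (pvSplit sep l).modifyHead (cur.reverse ++ ·) := by
  induction fuel with
  | zero =>
    intro l cur acc hf
    have : l = [] := by
      cases l with
      | nil => rfl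
      | cons a b => simp at hf
    subst this
    rw [pvGoZero]
    simp [pvSplit]
  | succ fuel ih =>
    intro l cur acc hf
    match l with
    | [] => rw [pvGoNil]; simp [pvSplit]
    | c :: rest =>
      rw [pvGoCons]
      by_cases hc : c = sep
      · rw [if_pos (by simp [List.isPrefixOf, hc])]
        rw [show List.drop 1 (c :: rest) = rest from rfl]
        rw [ih rest [] (cur.reverse :: acc) (by simp at hf; omega)]
        subst hc
        rw [pvSplit, if_pos (by simp)]
        match hx : pvSplit c rest with
        | [] => exact absurd hx (pvSplit_ne_nil c rest)
        | h' :: r => simp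
      · rw [if_neg (by simp [List.isPrefixOf]; intro h; exact absurd h.symm hc)]
        rw [ih rest (c :: cur) acc (by simp at hf; omega)]
        rw [pvSplit, if_neg (by simpa using hc)]
        match hx : pvSplit sep rest with
        | [] => exact absurd hx (pvSplit_ne_nil sep rest)
        | h' :: r => simp

theorem pvSplitOn_eq (sep : Char) (l : List Char) :
    PySem.Chars.splitOn l [sep] = pvSplit sep l := by
  rw [PySem.Chars.splitOn, pvSplitOn_go_eq sep (l.length + 1) l [] [] (by omega)]
  match hx : pvSplit sep l with
  | [] => exact absurd hx (pvSplit_ne_nil sep l)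
  | h' :: r => simp

theorem pvSplit_noSep (sep : Char) (l : List Char) (h : sep ∉ l) : pvSplit sep l = [l] := by
  induction l with
  | nil => rfl
  | cons c t ih =>
    have hc : ¬ c = sep := fun hh => h (by rw [hh]; simp)
    rw [pvSplit, if_neg (by simpa using hc), ih (fun hm => h (List.mem_cons_of_mem c hm))]

theorem pvSplit_two (sep : Char) (l : List Char) (h : sep ∈ l) :
    2 ≤ (pvSplit sep l).length := by
  induction l with
  | nil => simp at h
  | cons c t ih =>
    by_cases hc : c = sep
    · rw [pvSplit, if_pos (by simpa using hc)]
      have := List.length_pos_of_ne_nil (pvSplit_ne_nil sep t)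
      simp
      omega
    · have hm : sep ∈ t := by
        rcases List.mem_cons.mp h with hh | hh
        · exact absurd hh.symm hc
        · exact hh
      rw [pvSplit, if_neg (by simpa using hc)]
      match hx : pvSplit sep t with
      | [] => exact absurd hx (pvSplit_ne_nil sep t)
      | h' :: r =>
        have := ih hm
        rw [hx] at this
        simpa using this

theorem pvSplit_append (sep : Char) (ds : List Char) (h : sep ∉ ds) : ∀ l : List Char,
    pvSplit sep (ds ++ l) = (pvSplit sep l).modifyHead (ds ++ ·) := by
  induction ds with
  | nil =>
    intro l
    match hx : pvSplit sep l with
    | [] => exact absurd hx (pvSplit_ne_nil sep l)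
    | h' :: r => simp
  | cons c t ih =>
    intro l
    have hc : ¬ c = sep := fun hh => h (by rw [hh]; simp)
    rw [List.cons_append, pvSplit, if_neg (by simpa using hc),
      ih (fun hm => h (List.mem_cons_of_mem c hm)) l]
    match hx : pvSplit sep l with
    | [] => exact absurd hx (pvSplit_ne_nil sep l)
    | h' :: r => simp

theorem pvSplit_mid (sep : Char) (ds : List Char) (h : sep ∉ ds) (l : List Char) :
    pvSplit sep (ds ++ sep :: l) = ds :: pvSplit sep l := by
  rw [pvSplit_append sep ds h, pvSplit, if_pos (by simp)]
  simp

-- ========== the common reference: octets + optional port ==========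
def pvOcts (dots : Nat) (ip : List Char) : Bool :=
  decide ((pvSplit '.' ip).length = 4 - dots) && (pvSplit '.' ip).all (pvNumOk 0 255)

def pvRtail (dots : Nat) (l : List Char) : Bool :=
  match pvSplit ':' l with
  | [ip] => pvOcts dots ip
  | [ip, port] => pvOcts dots ip && pvNumOk 1 65535 port
  | _ => false

theorem pvOcts_ge4 (dots : Nat) (h : 4 ≤ dots) (ip : List Char) : pvOcts dots ip = false := by
  unfold pvOcts
  have := List.length_pos_of_ne_nil (pvSplit_ne_nil '.' ip)
  rw [decide_eq_false (by omega)]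
  simp

theorem pvRtail_ge4 (dots : Nat) (h : 4 ≤ dots) (l : List Char) : pvRtail dots l = false := by
  unfold pvRtail
  rcases hsp : pvSplit ':' l with _ | ⟨ip, _ | ⟨port, rest⟩⟩
  · rfl
  · simp [pvOcts_ge4 dots h]
  · cases rest <;> simp [pvOcts_ge4 dots h]

-- digit chars are not separators
theorem pvDigit_not_sep (c : Char) (hd : pvDigit c = true) : c ≠ '.' ∧ c ≠ ':' := by
  have := (pvDigitIff c).mp hd
  constructor <;> (rintro rfl; simp [Char.toNat] at this)

theorem pvNoSep_of_digits (sep : Char) (hs : pvDigit sep = false) (ds : List Char)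
    (h : ds.all pvDigit = true) : sep ∉ ds := by
  intro hm
  rw [List.all_eq_true] at h
  rw [h sep hm] at hs
  exact absurd hs (by simp)

-- a group with no '.' in it is a single octet
theorem pvOcts_single (dots : Nat) (ds : List Char) (hds : '.' ∉ ds) :
    pvOcts dots ds = (decide (dots = 3) && pvNumOk 0 255 ds) := by
  unfold pvOcts
  rw [pvSplit_noSep '.' ds hds]
  have : (decide (([ds] : List (List Char)).length = 4 - dots)) = decide (dots = 3) := by
    rw [Bool.eq_iff_iff]
    simp only [decide_eq_true_eq, List.length_cons, List.length_nil]
    omega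
  rw [this]
  simp

theorem pvOcts_step (dots : Nat) (ds : List Char) (hds : '.' ∉ ds) (p : List Char) :
    pvOcts dots (ds ++ '.' :: p) = (pvNumOk 0 255 ds && pvOcts (dots + 1) p) := by
  unfold pvOcts
  rw [pvSplit_mid '.' ds hds p]
  have hk := List.length_pos_of_ne_nil (pvSplit_ne_nil '.' p)
  rw [Bool.eq_iff_iff]
  simp only [List.length_cons, Bool.and_eq_true, decide_eq_true_eq, List.all_cons]
  constructor
  · rintro ⟨h1, h2, h3⟩; exact ⟨h2, by omega, h3⟩
  · rintro ⟨h1, h2, h3⟩; exact ⟨by omega, h1, h3⟩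

theorem pvOcts_bad (dots : Nat) (ds : List Char) (hds : '.' ∉ ds)
    (c : Char) (hc : pvDigit c = false) (hcd : c ≠ '.') (p : List Char) :
    pvOcts dots (ds ++ c :: p) = false := by
  unfold pvOcts
  have hblock : '.' ∉ ds ++ [c] := by
    intro hm
    rcases List.mem_append.mp hm with hm | hm
    · exact hds hm
    · simp at hm; exact hcd hm.symm
  rw [show ds ++ c :: p = (ds ++ [c]) ++ p by simp, pvSplit_append '.' (ds ++ [c]) hblock p]
  rcases hx : pvSplit '.' p with _ | ⟨q, rest⟩
  · exact absurd hx (pvSplit_ne_nil '.' p)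
  · have hbad : pvNumOk 0 255 (ds ++ c :: q) = false :=
      pvNumOk_nondigit 0 255 _ c (by simp) hc
    simp only [List.modifyHead_cons]
    rw [show (ds ++ [c]) ++ q = ds ++ c :: q by simp]
    simp [hbad]

-- pvRtail after a leading (possibly empty) block of digits
theorem pvRtail_nil (dots : Nat) (ds : List Char) (hd : ds.all pvDigit = true) :
    pvRtail dots ds = (decide (dots = 3) && pvNumOk 0 255 ds) := by
  have hcol : ':' ∉ ds := pvNoSep_of_digits ':' (by decide) ds hd
  have hdot : '.' ∉ ds := pvNoSep_of_digits '.' (by decide) ds hd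
  unfold pvRtail
  rw [pvSplit_noSep ':' ds hcol]
  exact pvOcts_single dots ds hdot

theorem pvRtail_dot (dots : Nat) (ds : List Char) (hd : ds.all pvDigit = true) (r : List Char) :
    pvRtail dots (ds ++ '.' :: r) = (pvNumOk 0 255 ds && pvRtail (dots + 1) r) := by
  have hdot : '.' ∉ ds := pvNoSep_of_digits '.' (by decide) ds hd
  have hblock : ':' ∉ ds ++ ['.'] := by
    intro hm
    rcases List.mem_append.mp hm with hm | hm
    · exact pvNoSep_of_digits ':' (by decide) ds hd hm
    · simp at hm
  unfold pvRtail
  rw [show ds ++ '.' :: r = (ds ++ ['.']) ++ r by simp, pvSplit_append ':' (ds ++ ['.']) hblock r]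
  rcases hx : pvSplit ':' r with _ | ⟨p, _ | ⟨q, rest⟩⟩
  · exact absurd hx (pvSplit_ne_nil ':' r)
  · simp only [List.modifyHead_cons]
    rw [show (ds ++ ['.']) ++ p = ds ++ '.' :: p by simp, pvOcts_step dots ds hdot p]
  · cases rest with
    | nil =>
      simp only [List.modifyHead_cons]
      rw [show (ds ++ ['.']) ++ p = ds ++ '.' :: p by simp, pvOcts_step dots ds hdot p]
      rw [Bool.and_assoc]
    | cons w ws => simp

theorem pvRtail_colon (dots : Nat) (ds : List Char) (hd : ds.all pvDigit = true) (r : List Char) :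
    pvRtail dots (ds ++ ':' :: r)
      = (decide (dots = 3) && pvNumOk 0 255 ds && pvNumOk 1 65535 r) := by
  have hcol : ':' ∉ ds := pvNoSep_of_digits ':' (by decide) ds hd
  have hdot : '.' ∉ ds := pvNoSep_of_digits '.' (by decide) ds hd
  unfold pvRtail
  rw [pvSplit_mid ':' ds hcol r]
  rcases hx : pvSplit ':' r with _ | ⟨p, _ | ⟨q, rest⟩⟩
  · exact absurd hx (pvSplit_ne_nil ':' r)
  · -- single part: r has no ':', so p = r
    have hnr : ':' ∉ r := by
      intro hm
      have := pvSplit_two ':' r hm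
      rw [hx] at this
      simp at this
    have : p = r := by
      have := pvSplit_noSep ':' r hnr
      rw [hx] at this
      exact (List.cons.injEq _ _ _ _ ▸ this).1
    subst this
    show (pvOcts dots ds && pvNumOk 1 65535 p) = _
    rw [pvOcts_single dots ds hdot]
  · -- r contains ':' hence is not a number
    have hnr : ':' ∈ r := by
      by_contra hm
      have := pvSplit_noSep ':' r hm
      rw [hx] at this
      simp at this
    have hbad : pvNumOk 1 65535 r = false := pvNumOk_nondigit 1 65535 r ':' hnr (by decide)
    cases rest <;> simp [hbad]

theorem pvRtail_other (dots : Nat) (ds : List Char) (hd : ds.all pvDigit = true)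
    (c : Char) (hc : pvDigit c = false) (hcd : c ≠ '.') (hcc : c ≠ ':') (r : List Char) :
    pvRtail dots (ds ++ c :: r) = false := by
  have hdot : '.' ∉ ds := pvNoSep_of_digits '.' (by decide) ds hd
  have hblock : ':' ∉ ds ++ [c] := by
    intro hm
    rcases List.mem_append.mp hm with hm | hm
    · exact pvNoSep_of_digits ':' (by decide) ds hd hm
    · simp at hm; exact hcc hm.symm
  unfold pvRtail
  rw [show ds ++ c :: r = (ds ++ [c]) ++ r by simp, pvSplit_append ':' (ds ++ [c]) hblock r]
  rcases hx : pvSplit ':' r with _ | ⟨p, _ | ⟨q, rest⟩⟩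
  · exact absurd hx (pvSplit_ne_nil ':' r)
  · simp only [List.modifyHead_cons]
    rw [show (ds ++ [c]) ++ p = ds ++ c :: p by simp, pvOcts_bad dots ds hdot c hc hcd p]
  · cases rest with
    | nil =>
      simp only [List.modifyHead_cons]
      rw [show (ds ++ [c]) ++ p = ds ++ c :: p by simp, pvOcts_bad dots ds hdot c hc hcd p]
      simp
    | cons w ws => simp

-- ========== B's machine equals the reference ==========
theorem pvDigitProp (c : Char) : pvDigit c = true ↔ ('0' ≤ c ∧ c ≤ '9') := by
  simp [pvDigit]

theorem pvDropWhile_head (l : List Char) (c : Char) (r : List Char)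
    (h : l.dropWhile pvDigit = c :: r) : pvDigit c = false := by
  induction l with
  | nil => simp at h
  | cons a t ih =>
    rw [List.dropWhile_cons] at h
    split_ifs at h with ha
    · exact ih h
    · cases h; simpa using ha

-- a digit-headed, zero-free number: pvNumOk collapses to the upper bound test
theorem pvNumOkP (lo hi : Nat) (hlo : lo ≤ 1) (c : Char) (hc : pvDigit c = true)
    (hc0 : c ≠ '0') (t : List Char) (ht : t.all pvDigit = true) :
    pvNumOk lo hi (c :: t) = decide (pvVal (c :: t) ≤ hi) := by
  have hnum := (pvDigitIff c).mp hc
  have hv1 : 1 ≤ c.toNat - 48 := by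
    have : c.toNat ≠ 48 := fun hh => hc0 ((pvCharEqIff c '0').mpr (by rw [hh]; rfl))
    omega
  have hge : lo ≤ pvVal (c :: t) := by
    rw [pvVal_cons]
    exact le_trans (le_trans hlo hv1) (pvValF_le t _)
  simp [pvNumOk, hc, ht, show ((c == '0') : Bool) = false by simp [hc0], decide_eq_true hge]

theorem pvGoPortAcc (dots : Nat) (t : List Char) : ∀ (val n : Nat), 1 ≤ val → val ≤ 65535 →
    addr_valid_alt_go t dots val (n + 1) false true
      = (t.all pvDigit && decide (pvValF val t ≤ 65535)) := by
  induction t with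
  | nil =>
    intro val n h1 h2
    simp [addr_valid_alt_go, pvValF_nil, h1, h2]
  | cons c r ih =>
    intro val n h1 h2
    rw [addr_valid_alt_go]
    by_cases hc : ('0' ≤ c ∧ c ≤ '9')
    · rw [if_pos hc]
      have hdc : pvDigit c = true := (pvDigitProp c).mpr hc
      rw [show ((n + 1 : Nat) == 0) = false by simp, if_neg (by simp), if_neg (by simp)]
      simp only [if_pos rfl]
      have hstep : pvValF val (c :: r) = pvValF (val * 10 + (c.toNat - 48)) r := by
        rw [pvValF_cons]; rfl
      by_cases hv : 65535 < val * 10 + (c.toNat - 48)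
      · rw [if_pos (by simpa using hv)]
        have : 65535 < pvValF val (c :: r) := by
          rw [hstep]; exact lt_of_lt_of_le hv (pvValF_le r _)
        rw [decide_eq_false (by omega)]
        simp
      · rw [if_neg (by simpa using hv)]
        rw [ih (val * 10 + (c.toNat - 48)) (n + 1) (by omega) (by omega)]
        rw [hstep]
        simp [hdc, Bool.and_assoc]
    · rw [if_neg hc]
      have hdc : pvDigit c = false := by
        rw [← Bool.not_eq_true, pvDigitProp]; exact hc
      rw [show (List.all (c :: r) pvDigit) = false by simp [hdc]]
      simp only [Bool.false_and]
      split_ifs <;> first | rfl | simp_all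

theorem pvGoPortZero (dots : Nat) (t : List Char) :
    addr_valid_alt_go t dots 0 1 true true = false := by
  cases t with
  | nil => simp [addr_valid_alt_go]
  | cons c r =>
    rw [addr_valid_alt_go]
    split_ifs <;> first | rfl | simp_all

theorem pvGoPort (dots : Nat) (b : Bool) (l : List Char) :
    addr_valid_alt_go l dots 0 0 b true = pvNumOk 1 65535 l := by
  cases l with
  | nil => simp [addr_valid_alt_go, pvNumOk]
  | cons c t =>
    rw [addr_valid_alt_go]
    by_cases hc : ('0' ≤ c ∧ c ≤ '9')
    · rw [if_pos hc, if_pos (by simp)]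
      have hdc : pvDigit c = true := (pvDigitProp c).mpr hc
      have hnum := (pvDigitIff c).mp hdc
      by_cases h0 : c = '0'
      · subst h0
        rw [show (('0' : Char).toNat - 48 : Nat) = 0 from rfl,
          show (('0' : Char) == '0') = true by simp, pvGoPortZero]
        symm
        cases t with
        | nil => simp [pvNumOk, pvVal, pvValF, pvStep]
        | cons d r => simp [pvNumOk]
      · rw [show ((c == '0') : Bool) = false by simp [h0]]
        have hv1 : 1 ≤ c.toNat - 48 := by
          have : c.toNat ≠ 48 := fun hh => h0 ((pvCharEqIff c '0').mpr (by rw [hh]; rfl))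
          omega
        rw [pvGoPortAcc dots t (c.toNat - 48) 0 hv1 (by omega)]
        by_cases ht : t.all pvDigit = true
        · rw [ht, Bool.true_and, pvNumOkP 1 65535 (le_refl 1) c hdc h0 t ht, pvVal_cons]
        · rw [show (t.all pvDigit) = false from by simpa using ht, Bool.false_and]
          obtain ⟨x, hx, hxd⟩ := List.all_eq_false.mp (by simpa using ht)
          rw [pvNumOk_nondigit 1 65535 (c :: t) x (by simp [hx]) (by simpa using hxd)]
    · rw [if_neg hc]
      have hdc : pvDigit c = false := by
        rw [← Bool.not_eq_true, pvDigitProp]; exact hc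
      rw [pvNumOk_nondigit 1 65535 (c :: t) c (by simp) hdc]
      split_ifs <;> first | rfl | simp_all

theorem pvGoOctAcc (dots : Nat) (l : List Char) : ∀ (val n : Nat), 1 ≤ val → val ≤ 255 →
    addr_valid_alt_go l dots val (n + 1) false false
      = (if 255 < pvValF val (l.takeWhile pvDigit) then false
         else match l.dropWhile pvDigit with
           | [] => decide (dots = 3)
           | c :: r =>
             if c = '.' then
               (if dots = 3 then false else addr_valid_alt_go r (dots + 1) 0 0 false false)
             else if c = ':' then
               (if dots = 3 then addr_valid_alt_go r dots 0 0 false true else false)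
             else false) := by
  induction l with
  | nil =>
    intro val n h1 h2
    simp [addr_valid_alt_go, pvValF_nil, h2, not_lt.mpr h2]
  | cons c t ih =>
    intro val n h1 h2
    rw [addr_valid_alt_go]
    by_cases hc : ('0' ≤ c ∧ c ≤ '9')
    · have hdc : pvDigit c = true := (pvDigitProp c).mpr hc
      rw [if_pos hc, List.takeWhile_cons_of_pos hdc, List.dropWhile_cons_of_pos hdc]
      rw [show ((n + 1 : Nat) == 0) = false by simp, if_neg (by simp), if_neg (by simp)]
      simp only [if_neg (by simp : ¬ (false = true))]
      have hstep : pvValF val (c :: t.takeWhile pvDigit)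
          = pvValF (val * 10 + (c.toNat - 48)) (t.takeWhile pvDigit) := by
        rw [pvValF_cons]; rfl
      by_cases hv : 255 < val * 10 + (c.toNat - 48)
      · rw [if_pos (by simpa using hv)]
        have : 255 < pvValF val (c :: t.takeWhile pvDigit) := by
          rw [hstep]; exact lt_of_lt_of_le hv (pvValF_le _ _)
        rw [if_pos this]
      · rw [if_neg (by simpa using hv)]
        rw [ih (val * 10 + (c.toNat - 48)) (n + 1) (by omega) (by omega)]
        rw [hstep]
    · have hdc : pvDigit c = false := by
        rw [← Bool.not_eq_true, pvDigitProp]; exact hc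
      rw [if_neg hc, List.takeWhile_cons_of_neg (by simp [hdc]),
        List.dropWhile_cons_of_neg (by simp [hdc]), pvValF_nil, if_neg (not_lt.mpr h2)]
      by_cases hd : c = '.'
      · subst hd
        rw [if_pos (by simp)]
        simp only []
        rw [if_pos trivial]
        rw [show ((false : Bool) || ((n+1 : Nat) == 0) || decide (dots = 3)) = decide (dots = 3) by simp]
        by_cases h3 : dots = 3
        · rw [if_pos h3, if_pos (by simp [h3])]
        · rw [if_neg h3, if_neg (by simp [h3])]
      · rw [if_neg (by simp [hd])]
        simp only []
        rw [if_neg hd]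
        by_cases hcl : c = ':'
        · subst hcl
          rw [if_pos (by simp)]
          simp only []
          rw [if_pos trivial]
          rw [show ((false : Bool) || !decide (dots = 3) || ((n+1 : Nat) == 0)) = !decide (dots = 3) by simp]
          by_cases h3 : dots = 3
          · rw [if_pos h3, if_neg (by simp [h3])]
          · rw [if_neg h3, if_pos (by simp [h3])]
        · rw [if_neg (by simp [hcl]), if_neg hcl]

theorem pvGoOctZero (dots : Nat) (l : List Char) :
    addr_valid_alt_go l dots 0 1 true false
      = (match l with
         | [] => decide (dots = 3)
         | c :: r =>
           if c = '.' then
             (if dots = 3 then false else addr_valid_alt_go r (dots + 1) 0 0 true false)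
           else if c = ':' then
             (if dots = 3 then addr_valid_alt_go r dots 0 0 true true else false)
           else false) := by
  cases l with
  | nil => simp [addr_valid_alt_go]
  | cons c r =>
    rw [addr_valid_alt_go]
    by_cases hc : ('0' ≤ c ∧ c ≤ '9')
    · have hdc : pvDigit c = true := (pvDigitProp c).mpr hc
      obtain ⟨hd1, hd2⟩ := pvDigit_not_sep c hdc
      rw [if_pos hc, show ((1 : Nat) == 0) = false by simp, if_neg (by simp), if_pos rfl]
      simp only []
      rw [if_neg hd1, if_neg hd2]
    · rw [if_neg hc]
      by_cases hd : c = '.'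
      · subst hd
        rw [if_pos (by simp)]
        simp only []
        rw [if_pos trivial]
        rw [show ((false : Bool) || ((1 : Nat) == 0) || decide (dots = 3)) = decide (dots = 3) by simp]
        by_cases h3 : dots = 3
        · rw [if_pos (by simp [h3]), if_pos h3]
        · rw [if_neg (by simp [h3]), if_neg h3]
      · rw [if_neg (by simp [hd])]
        by_cases hcl : c = ':'
        · subst hcl
          rw [if_pos (by simp)]
          simp only []
          rw [if_neg (show ¬((':' : Char) = '.') by decide), if_pos trivial]
          rw [show ((false : Bool) || !decide (dots = 3) || ((1 : Nat) == 0)) = !decide (dots = 3) by simp]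
          by_cases h3 : dots = 3
          · rw [if_neg (by simp [h3]), if_pos h3]
          · rw [if_pos (by simp [h3]), if_neg h3]
        · rw [if_neg (by simp [hcl])]
          simp only []
          rw [if_neg hd, if_neg hcl]

theorem pvGoMain (n : Nat) : ∀ (l : List Char), l.length ≤ n → ∀ (dots : Nat) (b : Bool),
    dots ≤ 3 → addr_valid_alt_go l dots 0 0 b false = pvRtail dots l := by
  induction n with
  | zero =>
    intro l hl dots b hd
    have : l = [] := by cases l with | nil => rfl | cons a t => simp at hl
    subst this
    rw [pvRtail_nil dots [] (by simp)]
    simp [addr_valid_alt_go, pvNumOk]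
  | succ n ih =>
    intro l hl dots b hd3
    cases l with
    | nil =>
      rw [pvRtail_nil dots [] (by simp)]
      simp [addr_valid_alt_go, pvNumOk]
    | cons c t =>
      have hlt : t.length ≤ n := by simp at hl; omega
      rw [addr_valid_alt_go]
      by_cases hc : ('0' ≤ c ∧ c ≤ '9')
      · have hdc : pvDigit c = true := (pvDigitProp c).mpr hc
        have hnum := (pvDigitIff c).mp hdc
        rw [if_pos hc, if_pos (by simp)]
        by_cases h0 : c = '0'
        · subst h0
          rw [show (('0' : Char).toNat - 48 : Nat) = 0 from rfl,
            show (('0' : Char) == '0') = true by simp, pvGoOctZero]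
          cases t with
          | nil =>
            rw [pvRtail_nil dots ['0'] (by decide)]
            simp [show pvNumOk 0 255 ['0'] = true by decide]
          | cons c2 r =>
            have hr : r.length ≤ n := by simp at hlt ⊢; omega
            by_cases hc2 : pvDigit c2 = true
            · -- "0d..." : leading zero, both sides false
              obtain ⟨hs1, hs2⟩ := pvDigit_not_sep c2 hc2
              simp only []
              rw [if_neg hs1, if_neg hs2]
              -- decompose '0' :: c2 :: r along its digit prefix
              have hds : ('0' :: c2 :: r) = ('0' :: c2 :: r.takeWhile pvDigit)
                  ++ r.dropWhile pvDigit := by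
                simp [List.takeWhile_append_dropWhile]
              have hall : (('0' : Char) :: c2 :: r.takeWhile pvDigit).all pvDigit = true := by
                simp [hc2, List.all_takeWhile, show pvDigit '0' = true by decide]
              have hbad : pvNumOk 0 255 ('0' :: c2 :: r.takeWhile pvDigit) = false := by
                simp [pvNumOk]
              rw [hds]
              rcases hdr : r.dropWhile pvDigit with _ | ⟨w, ws⟩
              · rw [List.append_nil, pvRtail_nil dots _ hall, hbad]; simp
              · have hw : pvDigit w = false := pvDropWhile_head r w ws hdr
                by_cases hwd : w = '.'
                · subst hwd; rw [pvRtail_dot dots _ hall, hbad]; simp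
                · by_cases hwc : w = ':'
                  · subst hwc; rw [pvRtail_colon dots _ hall, hbad]; simp
                  · rw [pvRtail_other dots _ hall w hw hwd hwc]
            · -- "0" then a separator or junk
              have hns : pvNumOk 0 255 ['0'] = true := by decide
              by_cases hwd : c2 = '.'
              · subst hwd
                simp only []
                rw [if_pos trivial]
                rw [show (('0' : Char) :: '.' :: r) = ['0'] ++ '.' :: r from rfl,
                  pvRtail_dot dots ['0'] (by decide) r, hns, Bool.true_and]
                by_cases h3 : dots = 3
                · rw [if_pos h3, h3, pvRtail_ge4 4 (by omega) r]
                · rw [if_neg h3, ih r hr (dots + 1) true (by omega)]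
              · by_cases hwc : c2 = ':'
                · subst hwc
                  simp only []
                  rw [if_pos trivial]
                  rw [show (('0' : Char) :: ':' :: r) = ['0'] ++ ':' :: r from rfl,
                    pvRtail_colon dots ['0'] (by decide) r, hns]
                  by_cases h3 : dots = 3
                  · rw [if_pos h3, pvGoPort dots true r]
                    simp [h3]
                  · rw [if_neg h3]
                    simp [h3]
                · simp only []
                  rw [if_neg hwd, if_neg hwc]
                  rw [show (('0' : Char) :: c2 :: r) = ['0'] ++ c2 :: r from rfl,
                    pvRtail_other dots ['0'] (by decide) c2 (by simpa using hc2) hwd hwc r]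
        · -- nonzero first digit: scan the whole octet
          rw [show ((c == '0') : Bool) = false by simp [h0]]
          have hv1 : 1 ≤ c.toNat - 48 := by
            have : c.toNat ≠ 48 := fun hh => h0 ((pvCharEqIff c '0').mpr (by rw [hh]; rfl))
            omega
          rw [pvGoOctAcc dots t (c.toNat - 48) 0 hv1 (by omega)]
          -- decompose c :: t along its digit prefix
          have hds : (c :: t) = (c :: t.takeWhile pvDigit) ++ t.dropWhile pvDigit := by
            simp [List.takeWhile_append_dropWhile]
          have hall : (c :: t.takeWhile pvDigit).all pvDigit = true := by
            simp [hdc, List.all_takeWhile]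
          have hnmk : pvNumOk 0 255 (c :: t.takeWhile pvDigit)
              = decide (pvVal (c :: t.takeWhile pvDigit) ≤ 255) :=
            pvNumOkP 0 255 (by omega) c hdc h0 _ (by simpa using List.all_takeWhile pvDigit t)
          have hvv : pvVal (c :: t.takeWhile pvDigit) = pvValF (c.toNat - 48) (t.takeWhile pvDigit) :=
            pvVal_cons c _
          rw [hds]
          by_cases hbig : 255 < pvValF (c.toNat - 48) (t.takeWhile pvDigit)
          · rw [if_pos hbig]
            have hbad : pvNumOk 0 255 (c :: t.takeWhile pvDigit) = false := by
              rw [hnmk, hvv, decide_eq_false (by omega)]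
            rcases hdr : t.dropWhile pvDigit with _ | ⟨w, ws⟩
            · rw [List.append_nil, pvRtail_nil dots _ hall, hbad]; simp
            · have hw : pvDigit w = false := pvDropWhile_head t w ws hdr
              by_cases hwd : w = '.'
              · subst hwd; rw [pvRtail_dot dots _ hall, hbad]; simp
              · by_cases hwc : w = ':'
                · subst hwc; rw [pvRtail_colon dots _ hall, hbad]; simp
                · rw [pvRtail_other dots _ hall w hw hwd hwc]
          · rw [if_neg hbig]
            have hgood : pvNumOk 0 255 (c :: t.takeWhile pvDigit) = true := by
              rw [hnmk, hvv, decide_eq_true (by omega)]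
            rcases hdr : t.dropWhile pvDigit with _ | ⟨w, ws⟩
            · rw [List.append_nil, pvRtail_nil dots _ hall, hgood]; simp
            · have hwlen : ws.length ≤ n := by
                have h1 := List.length_dropWhile_le pvDigit t
                rw [hdr] at h1
                simp at h1 hlt ⊢
                omega
              have hw : pvDigit w = false := pvDropWhile_head t w ws hdr
              simp only []
              by_cases hwd : w = '.'
              · subst hwd
                rw [if_pos rfl, pvRtail_dot dots _ hall ws, hgood, Bool.true_and]
                by_cases h3 : dots = 3
                · rw [if_pos h3, h3, pvRtail_ge4 4 (by omega) ws]
                · rw [if_neg h3, ih ws hwlen (dots + 1) false (by omega)]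
              · by_cases hwc : w = ':'
                · subst hwc
                  rw [if_neg hwd, if_pos rfl, pvRtail_colon dots _ hall ws, hgood]
                  by_cases h3 : dots = 3
                  · rw [if_pos h3, pvGoPort dots false ws]
                    simp [h3]
                  · rw [if_neg h3]
                    simp [h3]
                · rw [if_neg hwd, if_neg hwc,
                    pvRtail_other dots _ hall w hw hwd hwc ws]
      · -- first char not a digit
        rw [if_neg hc]
        have hdc : pvDigit c = false := by
          rw [← Bool.not_eq_true, pvDigitProp]; exact hc
        by_cases hwd : c = '.'
        · subst hwd
          rw [if_pos (by simp), if_pos (by simp),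
            show (('.' : Char) :: t) = [] ++ '.' :: t from rfl,
            pvRtail_dot dots [] (by simp) t]
          simp [pvNumOk]
        · by_cases hwc : c = ':'
          · subst hwc
            rw [if_neg (by simp [hwd]), if_pos (by simp), if_pos (by simp),
              show ((':' : Char) :: t) = [] ++ ':' :: t from rfl,
              pvRtail_colon dots [] (by simp) t]
            simp [pvNumOk]
          · rw [if_neg (by simp [hwd]), if_neg (by simp [hwc]),
              show (c :: t) = [] ++ c :: t from rfl,
              pvRtail_other dots [] (by simp) c hdc hwd hwc t]

-- ========== A equals the reference ==========
theorem pvLoopAll (l : List String) : addr_valid_loop l = l.all addr_valid_partOk := by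
  induction l with
  | nil => rfl
  | cons p t ih =>
    rw [addr_valid_loop, List.all_cons, ih]
    cases addr_valid_partOk p <;> simp

theorem pvIpOk_eq (s : String) : addr_valid_ipOk s = pvOcts 0 s.toList := by
  unfold addr_valid_ipOk
  have hparts : (PySem.Str.split? s ".").getD []
      = (pvSplit '.' s.toList).map String.ofList := by
    rw [PySem.Str.split?, show (".".toList) = ['.'] from rfl, PySem.Chars.split?,
      if_neg (by simp), pvSplitOn_eq]
    rfl
  rw [hparts]
  unfold pvOcts
  have hcomp : (fun x => addr_valid_partOk (String.ofList x)) = pvNumOk 0 255 := by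
    funext l
    rw [pvPartNum, String.toList_ofList]
  by_cases h : (pvSplit '.' s.toList).length = 4
  · rw [if_neg (by simp [h]), pvLoopAll, decide_eq_true (by simpa using h), Bool.true_and,
      List.all_map]
    simp only [Function.comp_def, hcomp]
  · rw [if_pos (by simp [h]), decide_eq_false (by simpa using h), Bool.false_and]

theorem pvA_eq (addr : String) :
    addr_valid addr = pvRtail 0 (PySem.Str.replace addr " " "").toList := by
  unfold addr_valid
  set t := PySem.Str.replace addr " " "" with ht
  dsimp only
  have hparts : (PySem.Str.split? t ":").getD []
      = (pvSplit ':' t.toList).map String.ofList := by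
    rw [PySem.Str.split?, show (":".toList) = [':'] from rfl, PySem.Chars.split?,
      if_neg (by simp), pvSplitOn_eq]
    rfl
  by_cases hc : ':' ∈ t.toList
  · have hfind : (PySem.Str.find t ":" != -1) = true := by
      rw [PySem.Str.find, show (":".toList) = [':'] from rfl]
      simp only [bne_iff_ne, ne_eq]
      intro h
      exact ((PySem.Chars.find_eq_neg_one_iff _ _).mp h)
        ((List.singleton_infix_iff ':' t.toList).mpr hc)
    rw [hfind, if_pos rfl]
    unfold pvRtail
    rcases hsp : pvSplit ':' t.toList with _ | ⟨ip, _ | ⟨port, _ | ⟨w, rest⟩⟩⟩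
    · exact absurd hsp (pvSplit_ne_nil ':' t.toList)
    · have h2 := pvSplit_two ':' t.toList hc
      rw [hsp] at h2
      simp at h2
    · rw [hparts, hsp]
      simp only [List.map_cons, List.map_nil, List.length_cons, List.length_nil,
        PySem.List.pyGet?, PySem.List.pyIdx?]
      norm_num
      rw [pvPortNum, String.toList_ofList, pvIpOk_eq, String.toList_ofList]
      cases hx : pvNumOk 1 65535 port <;> simp [hx]
    · rw [hparts, hsp]
      simp
  · have hfind : (PySem.Str.find t ":" != -1) = false := by
      rw [PySem.Str.find, show (":".toList) = [':'] from rfl]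
      simp only [bne_eq_false_iff_eq, beq_iff_eq]
      rw [PySem.Chars.find_eq_neg_one_iff]
      intro h
      exact hc ((List.singleton_infix_iff ':' t.toList).mp h)
    rw [hfind]
    simp only [Bool.false_eq_true, if_false]
    unfold pvRtail
    rw [pvSplit_noSep ':' t.toList hc]
    exact pvIpOk_eq t

-- ===== VERDICT (by name: the statement is the Claim_ definition above) =====
theorem addr_valid_spec : Claim_equal_addr_valid := by
  unfold Claim_equal_addr_valid Spec_addr_valid
  intro addr _
  rw [pvA_eq]
  unfold addr_valid_alt
  rw [pvGoMain (PySem.Str.replace addr " " "").toList.length _ (le_refl _) 0 false (by omega)]
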